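-- pv_equiv track=rewrite | github.com/joshchew24/AdventOfCode | 2021/day16/problem2.py | biggify
-- ===== SOURCE A (Python) =====
-- from copy import copy
--
-- def biggify(input):
--     # breakpoint()
--     big_grid = []
--     row = []
--     for line in input:
--         line = line.strip()
--         chars = [int(char) for char in line]
--         new_line = copy(line)
--         new_chars = copy(chars)
--         for i in range(4):
--             chars = new_chars
--             new_chars = []
--             for char in chars:
--                 new_line += str(add(char))
--                 new_chars.append(add(char))
--         big_grid.append(new_line)
--         row.append(new_line)
--
--
--     for i in range(4):
--         temp = []
--         for line in row:
--             new_line = ""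
--             new_line = new_line.join([str(add(int(char))) for char in line])
--             big_grid.append(new_line)
--             temp.append(new_line)
--         row = temp
--
--     return big_grid
--
-- def add(num):
--     return num + 1 if num < 9 else 1
-- ===== SOURCE B (Python) =====
-- def biggify(input):
--     # one unified pass: for each vertical tile tv and each stripped line,
--     # emit the full horizontally 5x-tiled row directly
--     def addk(d, k):
--         for _ in range(k):
--             d = d + 1 if d < 9 else 1
--         return d
--     stripped = [line.strip() for line in input]
--     return ["".join(str(addk(int(c), th + tv)) for th in range(5) for c in line)
--             for tv in range(5) for line in stripped]
-- ===== Notes on version B (the rewrite author's own statement) =====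
-- stated objective: simpler
-- what changed: Replaces A's two stateful phases (horizontal growth carrying a chars list across 4 iterations, then 4 vertical passes re-parsing previous rows) with one direct comprehension that computes each output cell by applying the increment step (th+tv) times to the original digit.
import Mathlib
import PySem

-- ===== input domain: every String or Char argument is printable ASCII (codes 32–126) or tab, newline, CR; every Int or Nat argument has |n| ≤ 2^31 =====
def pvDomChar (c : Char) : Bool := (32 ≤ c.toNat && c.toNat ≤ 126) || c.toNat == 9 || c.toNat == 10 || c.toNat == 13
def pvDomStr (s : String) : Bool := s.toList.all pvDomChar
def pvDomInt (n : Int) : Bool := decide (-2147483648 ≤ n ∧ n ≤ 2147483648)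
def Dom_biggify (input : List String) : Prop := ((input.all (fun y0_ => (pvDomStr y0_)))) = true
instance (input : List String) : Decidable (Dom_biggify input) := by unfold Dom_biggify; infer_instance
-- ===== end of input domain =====

-- B builds every tiled row in one pass (apply the increment th+tv times per digit) instead of A's
-- two stateful phases; objective: simpler. Equivalence of return values on digit-only inputs.

-- ===== PORT A =====
def pvAdd (num : Int) : Int := if num < 9 then num + 1 else 1

-- int(char) on a one-character string
def pvIntChar (c : Char) : Int := (PySem.Int.ofStr? (String.ofList [c])).getD 0

-- phase 1 of A, per line: strip, then 4 rounds of horizontal extension carrying (new_line, new_chars)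
def pvLineA (line : String) : String :=
  let line := PySem.Str.strip line
  let chars : List Int := line.toList.map pvIntChar
  ((List.range 4).foldl
    (fun (st : String × List Int) _ =>
      st.2.foldl (fun (st2 : String × List Int) ch =>
        (st2.1 ++ PySem.Int.toStr (pvAdd ch), st2.2 ++ [pvAdd ch])) (st.1, ([] : List Int)))
    (line, chars)).1

-- phase 2 of A, per line: "".join(str(add(int(char))) for char in line)
def pvVertLine (line : String) : String :=
  PySem.Str.join "" (line.toList.map (fun c => PySem.Int.toStr (pvAdd (pvIntChar c))))

def biggify (input : List String) : List String :=
  let p1 := input.foldl (fun (st : List String × List String) line =>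
      let nl := pvLineA line
      (st.1 ++ [nl], st.2 ++ [nl])) ([], [])
  ((List.range 4).foldl (fun (st : List String × List String) _ =>
      st.2.foldl (fun (st2 : List String × List String) line =>
        let nl := pvVertLine line
        (st2.1 ++ [nl], st2.2 ++ [nl])) (st.1, ([] : List String)))
    p1).1

-- ===== PORT B =====
-- addk of Source B: apply the increment step k times
def pvAddK (d : Int) (k : Nat) : Int :=
  (List.range k).foldl (fun a _ => if a < 9 then a + 1 else 1) d

def biggify_alt (input : List String) : List String :=
  let stripped := input.map PySem.Str.strip
  (List.range 5).flatMap (fun tv =>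
    stripped.map (fun line =>
      PySem.Str.join "" ((List.range 5).flatMap (fun th =>
        line.toList.map (fun c =>
          PySem.Int.toStr (pvAddK ((PySem.Int.ofStr? (String.ofList [c])).getD 0) (th + tv)))))))

-- ===== PRECONDITION & SPEC =====
-- Pre_ excludes exactly the inputs where A raises ValueError: a line whose stripped form
-- contains a non-digit character (int(char) fails there).
def Pre_biggify (input : List String) : Prop :=
  ∀ line ∈ input, ((PySem.Str.strip line).toList.all PySem.Chars.isdigit) = true
instance (input : List String) : Decidable (Pre_biggify input) := by unfold Pre_biggify; infer_instance

def pvWitness_biggify : List String := [" 09 ", "5"]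

def Spec_biggify (input : List String) (out : List String) : Prop := out = biggify_alt input
instance (input : List String) (out : List String) : Decidable (Spec_biggify input out) := by unfold Spec_biggify; infer_instance

-- ===== CLAIM (what is proved, stated in full; the proofs are below) =====
def Claim_equal_biggify : Prop := ∀ (input : List String), Dom_biggify input → Pre_biggify input → Spec_biggify input (biggify input)

-- ===== LEMMAS AND PROOFS =====

-- digit value of a digit character
def pvD2I (c : Char) : Int := (c.toNat : Int) - 48

-- the string rendering of a list of ints, as characters
def pvRender (xs : List Int) : List Char := (xs.map PySem.Int.toChars).flatten

-- the digit values of the tiled row tv of a line with digit values ds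
def pvBigRow (tv : Nat) (ds : List Int) : List Int :=
  (List.range 5).flatMap (fun th => ds.map (fun d => pvAdd^[th + tv] d))

-- the digit values of a stripped line
def pvDs (line : String) : List Int := (PySem.Str.strip line).toList.map pvD2I

theorem pvJoinNil (xss : List (List Char)) : PySem.Chars.join [] xss = xss.flatten := by
  induction xss with
  | nil => simp [PySem.Chars.join_nil]
  | cons p rest ih =>
    cases rest with
    | nil => simp [PySem.Chars.join_singleton]
    | cons q t => rw [PySem.Chars.join_cons_cons] at *; simp [ih]


theorem pvDigitChar (c : Char) (h : PySem.Chars.isdigit c = true) :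
    PySem.Int.ofStr? (String.ofList [c]) = some (pvD2I c) ∧
    PySem.Int.toChars (pvD2I c) = [c] ∧ 0 ≤ pvD2I c ∧ pvD2I c ≤ 9 := by
  simp [PySem.Chars.isdigit, Char.le_def, UInt32.le_iff_toNat_le] at h
  have hb : c.toNat = 48 ∨ c.toNat = 49 ∨ c.toNat = 50 ∨ c.toNat = 51 ∨ c.toNat = 52 ∨
      c.toNat = 53 ∨ c.toNat = 54 ∨ c.toNat = 55 ∨ c.toNat = 56 ∨ c.toNat = 57 := by omega
  rcases hb with h'|h'|h'|h'|h'|h'|h'|h'|h'|h' <;>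
  · have hc : Char.ofNat c.toNat = c := Char.ofNat_toNat c
    rw [h'] at hc
    rw [← hc]
    decide


theorem pvIntChar_digit (c : Char) (h : PySem.Chars.isdigit c = true) : pvIntChar c = pvD2I c := by
  simp [pvIntChar, (pvDigitChar c h).1]


theorem pvIter_bounds (k : Nat) (d : Int) (h0 : 0 ≤ d) (h9 : d ≤ 9) :
    0 ≤ pvAdd^[k] d ∧ pvAdd^[k] d ≤ 9 := by
  induction k generalizing d with
  | zero => simpa using ⟨h0, h9⟩
  | succ n ih =>
    rw [Function.iterate_succ_apply]
    exact ih _ (by unfold pvAdd; split <;> omega) (by unfold pvAdd; split <;> omega)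


theorem pvVertElem (d : Int) (h0 : 0 ≤ d) (h9 : d ≤ 9) :
    (PySem.Int.toChars d).flatMap (fun c => PySem.Int.toChars (pvAdd (pvIntChar c))) =
      PySem.Int.toChars (pvAdd d) := by
  interval_cases d <;> decide


theorem pvVert_render (xs : List Int) (h : ∀ x ∈ xs, 0 ≤ x ∧ x ≤ 9) :
    (pvRender xs).flatMap (fun c => PySem.Int.toChars (pvAdd (pvIntChar c))) =
      pvRender (xs.map pvAdd) := by
  induction xs with
  | nil => rfl
  | cons x t ih =>
    have hx := h x (by simp)
    simp only [pvRender, List.map_cons, List.flatten_cons, List.flatMap_append]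
    rw [pvVertElem x hx.1 hx.2]
    have := ih (fun y hy => h y (by simp [hy]))
    simp only [pvRender] at this
    simp [this]


theorem pvRender_digits (cs : List Char) (h : ∀ c ∈ cs, PySem.Chars.isdigit c = true) :
    pvRender (cs.map pvD2I) = cs := by
  induction cs with
  | nil => rfl
  | cons c t ih =>
    have hc := (pvDigitChar c (h c (by simp))).2.1
    simp only [pvRender, List.map_cons, List.flatten_cons, hc]
    have := ih (fun y hy => h y (by simp [hy]))
    simp only [pvRender] at this
    simpa [← List.map_map] using this


theorem pvInnerA (cs : List Int) (s : String) (acc : List Int) :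
    (cs.foldl (fun (st2 : String × List Int) ch =>
        (st2.1 ++ PySem.Int.toStr (pvAdd ch), st2.2 ++ [pvAdd ch])) (s, acc)).2
      = acc ++ cs.map pvAdd ∧
    (cs.foldl (fun (st2 : String × List Int) ch =>
        (st2.1 ++ PySem.Int.toStr (pvAdd ch), st2.2 ++ [pvAdd ch])) (s, acc)).1.toList
      = s.toList ++ pvRender (cs.map pvAdd) := by
  induction cs generalizing s acc with
  | nil => simp [pvRender]
  | cons x t ih =>
    simp only [List.foldl_cons, List.map_cons, pvRender, List.flatten_cons]
    obtain ⟨ih1, ih2⟩ := ih (s ++ PySem.Int.toStr (pvAdd x)) (acc ++ [pvAdd x])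
    refine ⟨by simp [ih1], ?_⟩
    rw [ih2]
    simp [pvRender, PySem.Int.toList_toStr]


theorem pvOuterA (n : Nat) (s : String) (ds : List Int) :
    ((List.range n).foldl
      (fun (st : String × List Int) _ =>
        st.2.foldl (fun (st2 : String × List Int) ch =>
          (st2.1 ++ PySem.Int.toStr (pvAdd ch), st2.2 ++ [pvAdd ch])) (st.1, ([] : List Int)))
      (s, ds)).2 = ds.map (fun d => pvAdd^[n] d) ∧
    ((List.range n).foldl
      (fun (st : String × List Int) _ =>
        st.2.foldl (fun (st2 : String × List Int) ch =>
          (st2.1 ++ PySem.Int.toStr (pvAdd ch), st2.2 ++ [pvAdd ch])) (st.1, ([] : List Int)))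
      (s, ds)).1.toList
      = s.toList ++ ((List.range n).map (fun j => pvRender (ds.map (fun d => pvAdd^[j+1] d)))).flatten := by
  induction n with
  | zero => simp
  | succ n ih =>
    rw [List.range_succ]
    simp only [List.foldl_append, List.foldl_cons, List.foldl_nil]
    obtain ⟨ih1, ih2⟩ := ih
    rw [ih1]
    obtain ⟨i1, i2⟩ := pvInnerA (ds.map (fun d => pvAdd^[n] d))
      (((List.range n).foldl _ (s, ds)).1) []
    constructor
    · rw [i1]
      simp [List.map_map, Function.comp, ← Function.iterate_succ_apply' pvAdd]
    · rw [i2, ih2]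
      simp only [List.map_map, List.map_append, List.flatten_append,
        List.map_cons, List.map_nil, List.flatten_cons, List.flatten_nil, List.append_nil,
        List.append_assoc]
      congr 2
      unfold pvRender
      congr 1
      rw [List.map_map, List.map_map]
      apply List.map_congr_left
      intro d _
      simp only [Function.comp_apply]
      rw [← Function.iterate_succ_apply' pvAdd]


theorem pvRender_append (a b : List Int) : pvRender (a ++ b) = pvRender a ++ pvRender b := by
  simp [pvRender]

theorem pvRender_flatMap (l : List Nat) (f : Nat → List Int) :
    pvRender (l.flatMap f) = (l.map (fun a => pvRender (f a))).flatten := by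
  induction l with
  | nil => rfl
  | cons a t ih => simp [List.flatMap_cons, pvRender_append, ih]

theorem pvLineA_spec (line : String)
    (h : ((PySem.Str.strip line).toList.all PySem.Chars.isdigit) = true) :
    (pvLineA line).toList = pvRender (pvBigRow 0 (pvDs line)) := by
  have hds : ∀ c ∈ (PySem.Str.strip line).toList, PySem.Chars.isdigit c = true :=
    List.all_eq_true.mp h
  have hchars : (PySem.Str.strip line).toList.map pvIntChar = pvDs line :=
    List.map_congr_left (fun c hc => pvIntChar_digit c (hds c hc))
  have hstrip : (PySem.Str.strip line).toList = pvRender (pvDs line) := by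
    unfold pvDs; exact (pvRender_digits _ hds).symm
  simp only [pvLineA]
  rw [hchars, (pvOuterA 4 (PySem.Str.strip line) (pvDs line)).2, hstrip]
  rw [pvBigRow, pvRender_flatMap]
  rw [show List.range 5 = [0,1,2,3,4] from rfl, show List.range 4 = [0,1,2,3] from rfl]
  simp

theorem pvDs_bounds (line : String)
    (h : ((PySem.Str.strip line).toList.all PySem.Chars.isdigit) = true) :
    ∀ d ∈ pvDs line, 0 ≤ d ∧ d ≤ 9 := by
  intro d hd
  simp only [pvDs, List.mem_map] at hd
  obtain ⟨c, hc, rfl⟩ := hd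
  have := pvDigitChar c (List.all_eq_true.mp h c hc)
  exact ⟨this.2.2.1, this.2.2.2⟩

theorem pvBigRow_bounds (tv : Nat) (ds : List Int) (h : ∀ d ∈ ds, 0 ≤ d ∧ d ≤ 9) :
    ∀ x ∈ pvBigRow tv ds, 0 ≤ x ∧ x ≤ 9 := by
  intro x hx
  simp only [pvBigRow, List.mem_flatMap, List.mem_map] at hx
  obtain ⟨th, -, d, hd, rfl⟩ := hx
  exact pvIter_bounds _ d (h d hd).1 (h d hd).2

theorem pvVertLine_spec (s : String) (xs : List Int) (hs : s.toList = pvRender xs)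
    (h : ∀ x ∈ xs, 0 ≤ x ∧ x ≤ 9) :
    (pvVertLine s).toList = pvRender (xs.map pvAdd) := by
  unfold pvVertLine
  rw [PySem.Str.toList_join, show ("" : String).toList = [] from rfl, pvJoinNil]
  have hflat : ((s.toList.map (fun c => PySem.Int.toStr (pvAdd (pvIntChar c)))).map String.toList).flatten
      = s.toList.flatMap (fun c => PySem.Int.toChars (pvAdd (pvIntChar c))) := by
    rw [List.flatMap_def, List.map_map]
    simp [Function.comp_def, PySem.Int.toList_toStr]
  rw [hflat, hs, pvVert_render xs h]

theorem pvBigRow_succ (tv : Nat) (ds : List Int) :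
    (pvBigRow tv ds).map pvAdd = pvBigRow (tv + 1) ds := by
  have hfun : (fun th => List.map pvAdd (List.map (fun d => pvAdd^[th + tv] d) ds))
      = (fun th => List.map (fun d => pvAdd^[th + (tv + 1)] d) ds) := by
    funext th
    rw [List.map_map]
    apply List.map_congr_left
    intro d _
    simp only [Function.comp_apply]
    rw [← Function.iterate_succ_apply' pvAdd, Nat.add_succ]
  simp only [pvBigRow, List.map_flatMap]
  rw [hfun]

theorem pvIterRow (i : Nat) (line : String)
    (h : ((PySem.Str.strip line).toList.all PySem.Chars.isdigit) = true) :
    (pvVertLine^[i] (pvLineA line)).toList = pvRender (pvBigRow i (pvDs line)) := by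
  induction i with
  | zero => simpa using pvLineA_spec line h
  | succ n ih =>
    rw [Function.iterate_succ_apply']
    rw [pvVertLine_spec _ _ ih (pvBigRow_bounds n _ (pvDs_bounds line h))]
    rw [pvBigRow_succ]

theorem pvAddK_iter (d : Int) (k : Nat) : pvAddK d k = pvAdd^[k] d := by
  induction k with
  | zero => rfl
  | succ n ih =>
    unfold pvAddK at *
    rw [List.range_succ, List.foldl_append, ih]
    simp [Function.iterate_succ_apply', pvAdd]

theorem pvFlattenFlatMap (l : List Nat) (F : Nat → List (List Char)) :
    (l.flatMap F).flatten = (l.map (fun a => (F a).flatten)).flatten := by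
  induction l with
  | nil => rfl
  | cons a t ih => simp [List.flatMap_cons, ih]

def pvRowB (tv : Nat) (line : String) : String :=
  PySem.Str.join "" ((List.range 5).flatMap (fun th =>
    (PySem.Str.strip line).toList.map (fun c =>
      PySem.Int.toStr (pvAddK ((PySem.Int.ofStr? (String.ofList [c])).getD 0) (th + tv)))))

theorem pvRowB_spec (tv : Nat) (line : String)
    (h : ((PySem.Str.strip line).toList.all PySem.Chars.isdigit) = true) :
    (pvRowB tv line).toList = pvRender (pvBigRow tv (pvDs line)) := by
  unfold pvRowB
  have hds : ∀ c ∈ (PySem.Str.strip line).toList, PySem.Chars.isdigit c = true :=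
    List.all_eq_true.mp h
  rw [PySem.Str.toList_join, show ("" : String).toList = [] from rfl, pvJoinNil]
  rw [List.map_flatMap, pvFlattenFlatMap, pvBigRow, pvRender_flatMap]
  apply congrArg List.flatten
  apply List.map_congr_left
  intro th _
  unfold pvRender pvDs
  rw [List.map_map, List.map_map, List.map_map]
  apply congrArg List.flatten
  apply List.map_congr_left
  intro c hc
  have hd := pvDigitChar c (hds c hc)
  simp only [Function.comp_apply, PySem.Int.toList_toStr]
  rw [show (PySem.Int.ofStr? (String.ofList [c])).getD 0 = pvD2I c by rw [hd.1]; rfl]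
  rw [pvAddK_iter]

theorem pvPhase1 (ls : List String) (a b : List String) :
    ls.foldl (fun (st : List String × List String) line =>
        (st.1 ++ [pvLineA line], st.2 ++ [pvLineA line])) (a, b)
      = (a ++ ls.map pvLineA, b ++ ls.map pvLineA) := by
  induction ls generalizing a b with
  | nil => simp
  | cons x t ih => simp [List.foldl_cons, ih]

theorem pvPhase2Inner (ls : List String) (a b : List String) :
    ls.foldl (fun (st2 : List String × List String) line =>
        (st2.1 ++ [pvVertLine line], st2.2 ++ [pvVertLine line])) (a, b)
      = (a ++ ls.map pvVertLine, b ++ ls.map pvVertLine) := by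
  induction ls generalizing a b with
  | nil => simp
  | cons x t ih => simp [List.foldl_cons, ih]

theorem pvAlt_eq (input : List String) :
    biggify_alt input = input.map (pvRowB 0) ++ (input.map (pvRowB 1) ++
      (input.map (pvRowB 2) ++ (input.map (pvRowB 3) ++ input.map (pvRowB 4)))) := by
  unfold biggify_alt pvRowB
  rw [show List.range 5 = [0,1,2,3,4] from rfl]
  simp [List.flatMap_cons, List.map_map, Function.comp_def]

-- ===== VERDICT (by name: the statement is the Claim_ definition above) =====
theorem biggify_spec : Claim_equal_biggify := by
  intro input hDom hPre
  unfold Spec_biggify biggify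
  rw [pvPhase1 input [] []]
  rw [show List.range 4 = [0,1,2,3] from rfl]
  simp only [List.foldl_cons, List.foldl_nil, List.nil_append, pvPhase2Inner,
    List.map_map, List.append_assoc]
  rw [pvAlt_eq]
  have block : ∀ (i : Nat) (f : String → String),
      (∀ l, ((PySem.Str.strip l).toList.all PySem.Chars.isdigit) = true →
        (f l).toList = pvRender (pvBigRow i (pvDs l))) →
      input.map f = input.map (pvRowB i) := by
    intro i f hf
    apply List.map_congr_left
    intro l hl
    exact String.toList_inj.mp ((hf l (hPre l hl)).trans (pvRowB_spec i l (hPre l hl)).symm)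
  rw [block 0 pvLineA (fun l hd => pvLineA_spec l hd),
    block 1 (pvVertLine ∘ pvLineA) (fun l hd => pvIterRow 1 l hd),
    block 2 (pvVertLine ∘ pvVertLine ∘ pvLineA) (fun l hd => pvIterRow 2 l hd),
    block 3 (pvVertLine ∘ pvVertLine ∘ pvVertLine ∘ pvLineA) (fun l hd => pvIterRow 3 l hd),
    block 4 (pvVertLine ∘ pvVertLine ∘ pvVertLine ∘ pvVertLine ∘ pvLineA) (fun l hd => pvIterRow 4 l hd)]
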